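-- pv_equiv track=rewrite | github.com/Nelfe80/RetroBat-API | panel_curator_ultimate.py | build_common_button_vars
-- ===== SOURCE A (Python) =====
-- def build_common_button_vars(players_data):
--     max_buttons = 0
--     for pdata in players_data:
--         max_buttons = max(max_buttons, len(pdata["buttons"]))
--
--     common = {}
--     for idx in range(1, max_buttons + 1):
--         logical_name = ""
--         function = ""
--         for pdata in players_data:
--             if idx <= len(pdata["buttons"]):
--                 b = pdata["buttons"][idx - 1]
--                 logical_name = b["logical_name"]
--                 function = b["function"]
--                 break
--
--         common[str(idx)] = {
--             "logical_name": logical_name,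
--             "function": function,
--         }
--     return common
-- ===== SOURCE B (Python) =====
-- def build_common_button_vars(players_data):
--     common = {}
--     for pdata in players_data:
--         for idx, b in enumerate(pdata["buttons"], 1):
--             key = str(idx)
--             if key not in common:
--                 common[key] = {
--                     "logical_name": b["logical_name"],
--                     "function": b["function"],
--                 }
--     return common
-- ===== Notes on version B (the rewrite author's own statement) =====
-- stated objective: simpler
-- what changed: Drops A's separate max_buttons pass and its per-index outer loop with an inner first-player scan; B makes one forward pass over players/buttons and fills each str(idx) key only if not already present, so the first player naturally wins every index.
import Mathlib
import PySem

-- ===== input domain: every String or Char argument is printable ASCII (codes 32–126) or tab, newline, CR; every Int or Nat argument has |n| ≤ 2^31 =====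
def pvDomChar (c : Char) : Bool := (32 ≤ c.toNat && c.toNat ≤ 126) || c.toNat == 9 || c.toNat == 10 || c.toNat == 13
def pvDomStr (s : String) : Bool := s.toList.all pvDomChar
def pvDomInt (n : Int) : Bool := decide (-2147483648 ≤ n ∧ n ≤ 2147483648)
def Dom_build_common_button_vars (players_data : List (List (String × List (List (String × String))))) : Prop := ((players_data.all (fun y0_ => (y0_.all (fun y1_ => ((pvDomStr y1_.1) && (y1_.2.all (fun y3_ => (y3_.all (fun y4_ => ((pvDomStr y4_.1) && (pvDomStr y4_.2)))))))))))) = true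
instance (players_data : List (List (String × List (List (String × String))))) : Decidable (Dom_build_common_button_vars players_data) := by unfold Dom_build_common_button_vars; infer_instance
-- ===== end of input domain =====

-- B replaces A's separate max_buttons pass and per-index outer loop (inner first-player scan
-- with break) by one forward pass over players/buttons that fills each str(idx) key only when
-- it is not yet present, so the first player wins every index.

-- ===== PORT A =====
-- pdata["buttons"] (KeyError excluded by Pre_)
def pvABtns (pdata : List (String × List (List (String × String)))) : List (List (String × String)) :=
  ((PySem.Dict.mk pdata).get? "buttons").getD []

-- A's inner 'for pdata in players_data: if idx <= len(...): ...; break' loop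
def pvAScan (players : List (List (String × List (List (String × String))))) (idx : Int) : String × String :=
  match players with
  | [] => ("", "")
  | pdata :: rest =>
    if idx ≤ ((pvABtns pdata).length : Int) then
      let b := (PySem.List.pyGet? (pvABtns pdata) (idx - 1)).getD []
      (((PySem.Dict.mk b).get? "logical_name").getD "", ((PySem.Dict.mk b).get? "function").getD "")
    else pvAScan rest idx

def build_common_button_vars (players_data : List (List (String × List (List (String × String))))) : List (String × List (String × String)) :=
  let max_buttons : Int := players_data.foldl (fun m pdata => max m ((pvABtns pdata).length : Int)) 0
  ((PySem.List.pyRange 1 (max_buttons + 1) 1).foldl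
    (fun common idx =>
      let r := pvAScan players_data idx
      common.insert (PySem.Int.toStr idx) [("logical_name", r.1), ("function", r.2)])
    PySem.Dict.empty).items

-- ===== PORT B =====
-- {"logical_name": b["logical_name"], "function": b["function"]}
def pvBEntry (b : List (String × String)) : List (String × String) :=
  [("logical_name", ((PySem.Dict.mk b).get? "logical_name").getD ""),
   ("function", ((PySem.Dict.mk b).get? "function").getD "")]

def build_common_button_vars_alt (players_data : List (List (String × List (List (String × String))))) : List (String × List (String × String)) :=
  (players_data.foldl
    (fun common pdata =>
      (PySem.List.enumerate (((PySem.Dict.mk pdata).get? "buttons").getD []) 1).foldl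
        (fun c ib =>
          let key := PySem.Int.toStr ib.1
          if c.contains key then c else c.insert key (pvBEntry ib.2)) common)
    PySem.Dict.empty).items

-- ===== PRECONDITION & SPEC =====
def pvMaxLen (l : List (List (String × List (List (String × String))))) : Nat :=
  l.foldl (fun m p => max m (pvABtns p).length) 0

-- Exactly the inputs on which Python A returns: every player dict carries "buttons" and, for
-- each index 1..max, the button that the FIRST player covering that index supplies carries both
-- "logical_name" and "function" (any other button is never read by A, nor by B).
def Pre_build_common_button_vars (players_data : List (List (String × List (List (String × String))))) : Prop :=
  (players_data.all (fun pdata => (PySem.Dict.mk pdata).contains "buttons")) = true ∧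
  ∀ i, i < pvMaxLen players_data →
    ((players_data.find? (fun p => decide (i + 1 ≤ (pvABtns p).length))).all (fun p =>
      ((PySem.Dict.mk ((pvABtns p).getD i [])).contains "logical_name" &&
       (PySem.Dict.mk ((pvABtns p).getD i [])).contains "function"))) = true
instance (players_data : List (List (String × List (List (String × String))))) : Decidable (Pre_build_common_button_vars players_data) := by unfold Pre_build_common_button_vars; infer_instance

def pvWitness_build_common_button_vars : (List (List (String × List (List (String × String))))) :=
  [[("buttons", [[("logical_name", "a"), ("function", "f")]])]]

def Spec_build_common_button_vars (players_data : List (List (String × List (List (String × String))))) (out : List (String × List (String × String))) : Prop := out = build_common_button_vars_alt players_data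
instance (players_data : List (List (String × List (List (String × String))))) (out : List (String × List (String × String))) : Decidable (Spec_build_common_button_vars players_data out) := by unfold Spec_build_common_button_vars; infer_instance

-- ===== CLAIM (what is proved, stated in full; the proofs are below) =====
def Claim_equal_build_common_button_vars : Prop := ∀ (players_data : List (List (String × List (List (String × String))))), Dom_build_common_button_vars players_data → Pre_build_common_button_vars players_data → Spec_build_common_button_vars players_data (build_common_button_vars players_data)

-- ===== LEMMAS AND PROOFS =====

-- str(idx) keys, and the canonical dict both folds build: keys "1".."n" in order
def pvKey (i : Nat) : String := PySem.Int.toStr (i : Int)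

def pvCanon (g : Nat → List (String × String)) (n : Nat) : PySem.Dict String (List (String × String)) :=
  PySem.Dict.mk ((List.range n).map (fun k => (pvKey (k + 1), g (k + 1))))

def pvEntA (players : List (List (String × List (List (String × String))))) (i : Nat) : List (String × String) :=
  [("logical_name", (pvAScan players (i : Int)).1), ("function", (pvAScan players (i : Int)).2)]

theorem pvToDigitsCore_eq (f : Nat) : ∀ (n : Nat) (l : List Char), 0 < n → n < 10 ^ f →
    Nat.toDigitsCore 10 f n l = ((Nat.digits 10 n).map Nat.digitChar).reverse ++ l := by
  induction f with
  | zero => intro n l h1 h2; simp at h2; omega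
  | succ f ih =>
    intro n l h1 h2
    have hstep : Nat.toDigitsCore 10 (f + 1) n l =
        if n / 10 = 0 then Nat.digitChar (n % 10) :: l
        else Nat.toDigitsCore 10 f (n / 10) (Nat.digitChar (n % 10) :: l) := by
      rw [Nat.toDigitsCore]
    rw [hstep, Nat.digits_def' (by norm_num : 1 < 10) h1]
    by_cases hd : n / 10 = 0
    · rw [if_pos hd, Nat.digits_eq_nil_iff_eq_zero.mpr hd]
      simp
    · rw [if_neg hd]
      have h1' : 0 < n / 10 := Nat.pos_of_ne_zero hd
      have h2' : n / 10 < 10 ^ f := by rw [pow_succ] at h2; omega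
      rw [ih (n / 10) _ h1' h2']
      simp

theorem pvCharDigit_digitChar (d : Nat) (h : d < 10) : (Nat.digitChar d).toNat - 48 = d := by
  interval_cases d <;> decide

theorem pvMapDecode (l : List Nat) (h : ∀ d ∈ l, d < 10) :
    (l.map Nat.digitChar).map (fun c => c.toNat - 48) = l := by
  induction l with
  | nil => rfl
  | cons d rest ih =>
    simp only [List.map_cons, List.cons.injEq]
    exact ⟨pvCharDigit_digitChar d (h d List.mem_cons_self),
      ih (fun x hx => h x (List.mem_cons_of_mem _ hx))⟩

theorem pvToDigits_eq (n : Nat) (h : 0 < n) :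
    Nat.toDigits 10 n = ((Nat.digits 10 n).map Nat.digitChar).reverse := by
  rw [Nat.toDigits, pvToDigitsCore_eq (n + 1) n [] h (by
    calc n < n + 1 := by omega
    _ ≤ 2 ^ (n + 1) := Nat.le_of_lt Nat.lt_two_pow_self
    _ ≤ 10 ^ (n + 1) := Nat.pow_le_pow_left (by norm_num) _)]
  simp

theorem pvToDigits_str0 (a : Nat) (h : Nat.toDigits 10 a = ['0']) : a = 0 := by
  by_contra ha0
  have ha : 0 < a := Nat.pos_of_ne_zero ha0
  rw [pvToDigits_eq a ha] at h
  have h2 : (Nat.digits 10 a).map Nat.digitChar = ['0'] := by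
    have := congrArg List.reverse h
    simpa using this
  rcases hds : Nat.digits 10 a with _ | ⟨d, rest⟩
  · exact ha0 (Nat.digits_eq_nil_iff_eq_zero.mp hds)
  · rw [hds] at h2
    simp only [List.map_cons] at h2
    have hrest : rest = [] := by cases rest <;> simp_all
    have hd0 : Nat.digitChar d = '0' := by simp_all
    have hdlt : d < 10 :=
      Nat.digits_lt_base (by norm_num) (by rw [hds]; exact List.mem_cons_self)
    have hdz : d = 0 := by
      have h3 := pvCharDigit_digitChar d hdlt
      rw [hd0] at h3
      simpa using h3.symm
    have h4 := Nat.ofDigits_digits 10 a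
    rw [hds, hrest, hdz] at h4
    simp [Nat.ofDigits] at h4
    exact ha0 h4.symm

theorem pvToDigits_inj {a b : Nat} (h : Nat.toDigits 10 a = Nat.toDigits 10 b) : a = b := by
  by_cases ha : 0 < a <;> by_cases hb : 0 < b
  · rw [pvToDigits_eq a ha, pvToDigits_eq b hb] at h
    have h2 : (Nat.digits 10 a).map Nat.digitChar = (Nat.digits 10 b).map Nat.digitChar := by
      have := congrArg List.reverse h
      simpa using this
    have h3 : Nat.digits 10 a = Nat.digits 10 b := by
      have := congrArg (List.map (fun c => c.toNat - 48)) h2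
      rwa [pvMapDecode _ (fun d hd => Nat.digits_lt_base (by norm_num) hd),
        pvMapDecode _ (fun d hd => Nat.digits_lt_base (by norm_num) hd)] at this
    exact Nat.digits.injective 10 h3
  · have hb0 : b = 0 := by omega
    rw [hb0, show Nat.toDigits 10 0 = ['0'] by decide] at h
    have := pvToDigits_str0 a h
    omega
  · have ha0 : a = 0 := by omega
    rw [ha0, show Nat.toDigits 10 0 = ['0'] by decide] at h
    have := pvToDigits_str0 b h.symm
    omega
  · omega

theorem pvKey_inj {i j : Nat} (h : pvKey i = pvKey j) : i = j := by
  unfold pvKey at h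
  have h2 := congrArg String.toList h
  rw [PySem.Int.toList_toStr, PySem.Int.toList_toStr] at h2
  unfold PySem.Int.toChars at h2
  rw [if_neg (by omega), if_neg (by omega)] at h2
  simp only [Int.toNat_natCast] at h2
  exact pvToDigits_inj h2

theorem pvCanon_contains (g : Nat → List (String × String)) (n i : Nat) :
    (pvCanon g n).contains (pvKey i) = decide (1 ≤ i ∧ i ≤ n) := by
  unfold pvCanon
  simp only [PySem.Dict.contains, List.any_map]
  by_cases h : 1 ≤ i ∧ i ≤ n
  · rw [show decide (1 ≤ i ∧ i ≤ n) = true by simp [h], List.any_eq_true]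
    refine ⟨i - 1, by rw [List.mem_range]; omega, ?_⟩
    simp only [Function.comp, beq_iff_eq]
    congr 1
    omega
  · rw [show decide (1 ≤ i ∧ i ≤ n) = false by simp [h], List.any_eq_false]
    intro k hk
    rw [List.mem_range] at hk
    simp only [Function.comp, beq_iff_eq]
    intro hkey
    have := pvKey_inj hkey
    omega

theorem pvCanon_congr (g g' : Nat → List (String × String)) (n : Nat)
    (h : ∀ i, 1 ≤ i → i ≤ n → g i = g' i) : pvCanon g n = pvCanon g' n := by
  unfold pvCanon
  congr 1
  apply List.map_congr_left
  intro k hk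
  rw [List.mem_range] at hk
  rw [h (k + 1) (by omega) (by omega)]

theorem pvCanon_insert_succ (g : Nat → List (String × String)) (n : Nat) (v : List (String × String)) :
    (pvCanon g n).insert (pvKey (n + 1)) v = pvCanon (fun j => if j = n + 1 then v else g j) (n + 1) := by
  have hc : (pvCanon g n).contains (pvKey (n + 1)) = false := by
    rw [pvCanon_contains]; simp
  apply PySem.Dict.ext
  rw [PySem.Dict.items_insert_of_not_contains _ _ hc]
  unfold pvCanon
  rw [List.range_succ, List.map_append]
  congr 1
  · apply List.map_congr_left
    intro k hk
    rw [List.mem_range] at hk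
    have hne : k + 1 ≠ n + 1 := by omega
    dsimp only
    rw [if_neg hne]
  · simp

theorem pvCanon_zero (g : Nat → List (String × String)) : pvCanon g 0 = PySem.Dict.empty := rfl

theorem pvMaxFold_int (l : List (List (String × List (List (String × String))))) : ∀ (a : Nat),
    l.foldl (fun m pdata => max m ((pvABtns pdata).length : Int)) (a : Int)
      = ((l.foldl (fun m p => max m (pvABtns p).length) a : Nat) : Int) := by
  induction l with
  | nil => intro a; rfl
  | cons p rest ih =>
    intro a
    simp only [List.foldl_cons]
    rw [show (max (a : Int) ((pvABtns p).length : Int)) = ((max a (pvABtns p).length : Nat) : Int) by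
      push_cast; rfl]
    exact ih _

theorem pvMaxAcc (l : List (List (String × List (List (String × String))))) : ∀ (a : Nat),
    l.foldl (fun m p => max m (pvABtns p).length) a
      = max a (l.foldl (fun m p => max m (pvABtns p).length) 0) := by
  induction l with
  | nil => intro a; simp
  | cons p rest ih =>
    intro a
    simp only [List.foldl_cons]
    rw [ih (max a _), ih (max 0 _)]
    omega

theorem pvExists_cover (l : List (List (String × List (List (String × String))))) (j : Nat)
    (h1 : 1 ≤ j) (h2 : j ≤ pvMaxLen l) : ∃ p ∈ l, j ≤ (pvABtns p).length := by
  induction l with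
  | nil => unfold pvMaxLen at h2; simp at h2; omega
  | cons p rest ih =>
    unfold pvMaxLen at h2
    simp only [List.foldl_cons] at h2
    rw [pvMaxAcc] at h2
    by_cases hc : j ≤ (pvABtns p).length
    · exact ⟨p, List.mem_cons_self, hc⟩
    · obtain ⟨q, hq, hq2⟩ := ih (by unfold pvMaxLen; omega)
      exact ⟨q, List.mem_cons_of_mem _ hq, hq2⟩

theorem pvLenLe (l : List (List (String × List (List (String × String))))) (p : List (String × List (List (String × String)))) : p ∈ l → (pvABtns p).length ≤ pvMaxLen l := by
  induction l with
  | nil => intro hp; simp at hp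
  | cons q rest ih =>
    intro hp
    unfold pvMaxLen
    simp only [List.foldl_cons]
    rw [pvMaxAcc]
    rcases List.mem_cons.mp hp with h | h
    · rw [h]; omega
    · have := ih h
      unfold pvMaxLen at this
      omega

theorem pvNotCover (l : List (List (String × List (List (String × String))))) (j : Nat)
    (h2 : pvMaxLen l < j) : l.find? (fun p => decide (j ≤ (pvABtns p).length)) = none := by
  rw [List.find?_eq_none]
  intro p hp
  simp only [decide_eq_true_eq]
  intro hc
  have := pvLenLe l p hp
  omega

theorem pvAFold (players : List (List (String × List (List (String × String))))) : ∀ (m : Nat),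
    (PySem.List.pyRange 1 ((m : Int) + 1) 1).foldl
      (fun common idx =>
        let r := pvAScan players idx
        common.insert (PySem.Int.toStr idx) [("logical_name", r.1), ("function", r.2)])
      PySem.Dict.empty = pvCanon (pvEntA players) m := by
  intro m
  induction m with
  | zero =>
    rw [PySem.List.pyRange_one_eq_nil (by omega)]
    rfl
  | succ m ih =>
    rw [show ((m + 1 : Nat) : Int) + 1 = (((m : Int) + 1) + 1) by push_cast; ring,
      PySem.List.pyRange_one_succ_right (by omega), List.foldl_append, ih]
    simp only [List.foldl_cons, List.foldl_nil]
    rw [show ((m : Int) + 1) = (((m + 1 : Nat) : Int)) by push_cast; ring]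
    rw [show PySem.Int.toStr ((m + 1 : Nat) : Int) = pvKey (m + 1) from rfl]
    rw [pvCanon_insert_succ]
    apply pvCanon_congr
    intro i hi1 hi2
    by_cases he : i = m + 1
    · rw [if_pos he, he]
      rfl
    · rw [if_neg he]

def pvFirstEnt (ps : List (List (String × List (List (String × String))))) (j : Nat) : List (String × String) :=
  match ps.find? (fun p => decide (j ≤ (pvABtns p).length)) with
  | some p => pvBEntry ((pvABtns p).getD (j - 1) [])
  | none => []

theorem pvBInner (bs : List (List (String × String))) : ∀ (g : Nat → List (String × String)) (n : Nat),
    (PySem.List.enumerate bs 1).foldl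
      (fun c ib =>
        let key := PySem.Int.toStr ib.1
        if c.contains key then c else c.insert key (pvBEntry ib.2)) (pvCanon g n)
    = pvCanon (fun j => if n < j ∧ j ≤ bs.length then pvBEntry (bs.getD (j - 1) []) else g j)
        (max n bs.length) := by
  induction bs using List.reverseRecOn with
  | nil =>
    intro g n
    simp only [PySem.List.enumerate_nil, List.foldl_nil, List.length_nil, Nat.max_zero]
    apply pvCanon_congr
    intro i hi1 hi2
    rw [if_neg (by omega)]
  | append_singleton bs b ih =>
    intro g n
    rw [PySem.List.enumerate_append, List.foldl_append, ih]
    simp only [PySem.List.enumerate_cons, PySem.List.enumerate_nil, List.foldl_cons, List.foldl_nil]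
    set L := bs.length with hL
    rw [show (1 : Int) + (L : Int) = ((L + 1 : Nat) : Int) by push_cast; ring]
    rw [show PySem.Int.toStr ((L + 1 : Nat) : Int) = pvKey (L + 1) from rfl]
    simp only [pvCanon_contains]
    by_cases hcase : L + 1 ≤ n
    · rw [if_pos (by simp only [decide_eq_true_eq]; omega)]
      rw [show max n L = max n (L + 1) by omega,
        show max n (bs ++ [b]).length = max n (L + 1) by simp [hL]]
      apply pvCanon_congr
      intro i hi1 hi2
      by_cases hin : n < i ∧ i ≤ L
      · rw [if_pos hin, if_pos (by simp; omega)]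
        congr 1
        rw [List.getD_eq_getElem?_getD, List.getD_eq_getElem?_getD,
          List.getElem?_append_left (by omega)]
      · rw [if_neg hin, if_neg (by simp; omega)]
    · rw [if_neg (by simp only [decide_eq_true_eq]; omega)]
      rw [show max n L = L by omega, pvCanon_insert_succ,
        show max n (bs ++ [b]).length = L + 1 by simp [hL]; omega]
      apply pvCanon_congr
      intro i hi1 hi2
      by_cases he : i = L + 1
      · rw [if_pos he, if_pos (by simp; omega)]
        rw [he]
        congr 1
        rw [List.getD_eq_getElem?_getD, List.getElem?_append_right (by omega)]
        simp [hL]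
      · rw [if_neg he]
        by_cases hin : n < i ∧ i ≤ L
        · rw [if_pos hin, if_pos (by simp; omega)]
          congr 1
          rw [List.getD_eq_getElem?_getD, List.getD_eq_getElem?_getD,
            List.getElem?_append_left (by omega)]
        · rw [if_neg hin, if_neg (by simp; omega)]

-- value of the first player covering index j

theorem pvBOuter (ps : List (List (String × List (List (String × String))))) :
    ps.foldl
      (fun common pdata =>
        (PySem.List.enumerate (((PySem.Dict.mk pdata).get? "buttons").getD []) 1).foldl
          (fun c ib =>
            let key := PySem.Int.toStr ib.1
            if c.contains key then c else c.insert key (pvBEntry ib.2)) common)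
      PySem.Dict.empty = pvCanon (pvFirstEnt ps) (pvMaxLen ps) := by
  induction ps using List.reverseRecOn with
  | nil =>
    rw [show pvCanon (pvFirstEnt []) (pvMaxLen []) = pvCanon (pvFirstEnt []) 0 from rfl]
    rw [pvCanon_zero]
    rfl
  | append_singleton ps p ih =>
    rw [List.foldl_append, ih]
    simp only [List.foldl_cons, List.foldl_nil]
    rw [show (((PySem.Dict.mk p).get? "buttons").getD []) = pvABtns p from rfl, pvBInner]
    rw [show pvMaxLen (ps ++ [p]) = max (pvMaxLen ps) (pvABtns p).length by
      unfold pvMaxLen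
      rw [List.foldl_append]
      simp only [List.foldl_cons, List.foldl_nil]]
    apply pvCanon_congr
    intro i hi1 hi2
    unfold pvFirstEnt
    rw [List.find?_append]
    by_cases hin : pvMaxLen ps < i ∧ i ≤ (pvABtns p).length
    · rw [if_pos hin, pvNotCover ps i hin.1]
      simp [hin.2]
    · rw [if_neg hin]
      have hile : i ≤ pvMaxLen ps := by omega
      obtain ⟨q, hq, hq2⟩ := pvExists_cover ps i hi1 hile
      have : (ps.find? (fun p => decide (i ≤ (pvABtns p).length))).isSome := by
        rw [List.find?_isSome]
        exact ⟨q, hq, by simp [hq2]⟩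
      rcases ho : ps.find? (fun p => decide (i ≤ (pvABtns p).length)) with _ | r
      · rw [ho] at this; simp at this
      · simp

theorem pvFirstEnt_eq_entA (players : List (List (String × List (List (String × String))))) (j : Nat)
    (h1 : 1 ≤ j) : ∀ (hc : ∃ p ∈ players, j ≤ (pvABtns p).length),
    pvFirstEnt players j = pvEntA players j := by
  induction players with
  | nil => intro hc; simp at hc
  | cons p rest ih =>
    intro hc
    by_cases hcp : j ≤ (pvABtns p).length
    · unfold pvFirstEnt
      rw [List.find?_cons_of_pos (p := fun q => decide (j ≤ (pvABtns q).length)) (by simp [hcp])]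
      unfold pvEntA pvAScan
      rw [if_pos (by omega)]
      simp only []
      have hidx : ((j : Int) - 1) = (((j - 1 : Nat) : Int)) := by omega
      rw [hidx, PySem.List.pyGet?_natCast]
      rw [show ((pvABtns p)[j-1]?).getD [] = (pvABtns p).getD (j-1) [] from
        (List.getD_eq_getElem?_getD ..).symm]
      rfl
    · have hrest : ∃ q ∈ rest, j ≤ (pvABtns q).length := by
        rcases hc with ⟨q, hq, hq2⟩
        rcases List.mem_cons.mp hq with h | h
        · exact absurd (h ▸ hq2) hcp
        · exact ⟨q, h, hq2⟩
      unfold pvFirstEnt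
      rw [List.find?_cons_of_neg (p := fun q => decide (j ≤ (pvABtns q).length)) (by simp [hcp])]
      have hr := ih hrest
      unfold pvFirstEnt at hr
      rw [hr]
      unfold pvEntA pvAScan
      rw [if_neg (by omega)]
      cases rest <;> rfl

-- ===== VERDICT (by name: the statement is the Claim_ definition above) =====
theorem build_common_button_vars_spec : Claim_equal_build_common_button_vars := by
  intro players _ _
  unfold Spec_build_common_button_vars build_common_button_vars build_common_button_vars_alt
  dsimp only
  rw [show (0 : Int) = ((0 : Nat) : Int) from rfl, pvMaxFold_int, pvAFold, pvBOuter]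
  congr 1
  exact pvCanon_congr _ _ _ (fun i hi1 hi2 =>
    (pvFirstEnt_eq_entA players i hi1 (pvExists_cover players i hi1 hi2)).symm)
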